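-- pv_equiv track=rewrite | github.com/pravash02/interviewbit_programs | heaps_and_maps/profit_maximisation.py | solve
-- ===== SOURCE A (Python) =====
-- def solve(A, B):
--     res = 0
--     while B > 0:
--         temp = max(A)
--         i = A.index(temp)
--         A[i] = A[i] - 1
--         res += temp
--         B -= 1
--     return res
-- ===== SOURCE B (Python) =====
-- def solve(A, B):
--     # Sort once ascending; the maximum is always the last element, so each round
--     # pops the tail and re-inserts its decrement at its binary-searched position.
--     xs = sorted(A)
--     res = 0
--     while B > 0:
--         top = xs.pop()
--         res += top
--         v = top - 1
--         lo, hi = 0, len(xs)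
--         while lo < hi:
--             mid = (lo + hi) // 2
--             if xs[mid] < v:
--                 lo = mid + 1
--             else:
--                 hi = mid
--         xs.insert(lo, v)
--         B -= 1
--     return res
-- ===== Notes on version B (the rewrite author's own statement) =====
-- stated objective: faster
-- what changed: Instead of rescanning the whole unsorted list for max and its index on every round (two full Python-level+C passes per pick), B sorts once and keeps the list ascending, popping the max from the end and re-inserting its decrement at a binary-searched position.
import Mathlib
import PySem

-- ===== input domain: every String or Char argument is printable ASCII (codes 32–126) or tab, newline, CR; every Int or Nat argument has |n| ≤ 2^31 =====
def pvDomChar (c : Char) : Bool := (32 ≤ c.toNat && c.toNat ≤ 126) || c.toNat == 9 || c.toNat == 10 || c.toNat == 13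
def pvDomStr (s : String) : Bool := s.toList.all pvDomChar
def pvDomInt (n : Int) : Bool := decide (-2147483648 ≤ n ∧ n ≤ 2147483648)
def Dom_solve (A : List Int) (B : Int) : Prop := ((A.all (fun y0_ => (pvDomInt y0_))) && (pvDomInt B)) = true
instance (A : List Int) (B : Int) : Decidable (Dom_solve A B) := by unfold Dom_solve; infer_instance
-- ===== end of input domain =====

-- B sorts once and keeps the list ascending (max = last element, decrement re-inserted by
-- binary search) instead of rescanning the whole list for max and its index each round;
-- equivalence is about the RETURN value only (Python A mutates its list argument in place,
-- B pops/inserts on its own sorted copy).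

-- ===== PORT A =====
def solveLoopA (fuel : Nat) (xs : List Int) (res : Int) : Int :=
  match fuel with
  | 0 => res
  | f + 1 =>
    match PySem.List.max? xs (fun y => y) with
    | none => res                                  -- Python: max([]) raises ValueError (excluded by Pre_)
    | some temp =>
      match PySem.List.index? xs temp with
      | none => res                                -- unreachable: temp ∈ xs
      | some i =>
        solveLoopA f (PySem.List.pySetD xs (i : Int) (PySem.List.pyGetD xs (i : Int) 0 - 1)) (res + temp)

def solve (A : List Int) (B : Int) : Int := solveLoopA B.toNat A 0

-- ===== PORT B =====
-- Source B's inner 'while lo < hi' binary search; xs[mid] is in range whenever hi ≤ len xs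
def bsearch (xs : List Int) (v : Int) (lo hi : Nat) : Nat :=
  if _h : lo < hi then
    if xs.getD ((lo + hi) / 2) 0 < v then bsearch xs v ((lo + hi) / 2 + 1) hi
    else bsearch xs v lo ((lo + hi) / 2)
  else lo
termination_by hi - lo
decreasing_by all_goals omega

def solveLoopB (fuel : Nat) (xs : List Int) (res : Int) : Int :=
  match fuel with
  | 0 => res
  | f + 1 =>
    match PySem.List.pop? xs with                  -- xs.pop(); Python raises IndexError on [] (excluded by Pre_)
    | none => res
    | some (top, rest) =>
      let v := top - 1
      let lo := bsearch rest v 0 rest.length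
      solveLoopB f (PySem.List.insert rest (lo : Int) v) (res + top)

def solve_alt (A : List Int) (B : Int) : Int :=
  solveLoopB B.toNat (PySem.List.sorted A (fun x => x) false) 0

-- ===== PRECONDITION & SPEC =====
-- Python A raises ValueError (max of empty list) exactly when A = [] and B > 0.
def Pre_solve (A : List Int) (B : Int) : Prop := A ≠ [] ∨ B ≤ 0
instance (A : List Int) (B : Int) : Decidable (Pre_solve A B) := by unfold Pre_solve; infer_instance
def pvWitness_solve : List Int × Int := ([3, 1, 3], 4)

def Spec_solve (A : List Int) (B : Int) (out : Int) : Prop := out = solve_alt A B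
instance (A : List Int) (B : Int) (out : Int) : Decidable (Spec_solve A B out) := by unfold Spec_solve; infer_instance

-- ===== CLAIM (what is proved, stated in full; the proofs are below) =====
def Claim_equal_solve : Prop := ∀ (A : List Int) (B : Int), Dom_solve A B → Pre_solve A B → Spec_solve A B (solve A B)

-- ===== LEMMAS AND PROOFS =====

-- sorted lists are monotone in getD (for in-range indices)
theorem getD_mono_of_pairwise (xs : List Int) (hs : xs.Pairwise (· ≤ ·))
    {i j : Nat} (hij : i ≤ j) (hj : j < xs.length) : xs.getD i 0 ≤ xs.getD j 0 := by
  rcases Nat.eq_or_lt_of_le hij with h | h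
  · subst h; exact le_refl _
  · have hi : i < xs.length := lt_trans h hj
    have := List.pairwise_iff_getElem.mp hs i j hi hj h
    simpa [List.getD_eq_getElem?_getD, List.getElem?_eq_getElem, hi, hj] using this

-- the binary search returns the leftmost insertion point for v
theorem bsearch_spec (xs : List Int) (hs : xs.Pairwise (· ≤ ·)) (v : Int) :
    ∀ (n lo hi : Nat), hi - lo ≤ n → lo ≤ hi → hi ≤ xs.length →
    (∀ j, j < lo → xs.getD j 0 < v) →
    (∀ j, hi ≤ j → j < xs.length → v ≤ xs.getD j 0) →
    bsearch xs v lo hi ≤ xs.length ∧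
    (∀ j, j < bsearch xs v lo hi → xs.getD j 0 < v) ∧
    (∀ j, bsearch xs v lo hi ≤ j → j < xs.length → v ≤ xs.getD j 0) := by
  intro n
  induction n with
  | zero =>
    intro lo hi hn hlohi hhi hlt hge
    have : lo = hi := by omega
    subst this
    rw [bsearch]
    simp only [lt_irrefl, dite_false]
    exact ⟨hhi, hlt, hge⟩
  | succ k ih =>
    intro lo hi hn hlohi hhi hlt hge
    rw [bsearch]
    by_cases h : lo < hi
    · simp only [h, dite_true]
      have hmid1 : lo ≤ (lo + hi) / 2 := by omega
      have hmid2 : (lo + hi) / 2 < hi := by omega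
      have hmidlen : (lo + hi) / 2 < xs.length := lt_of_lt_of_le hmid2 hhi
      by_cases hc : xs.getD ((lo + hi) / 2) 0 < v
      · simp only [hc, if_true]
        refine ih ((lo + hi) / 2 + 1) hi (by omega) (by omega) hhi ?_ hge
        intro j hj
        by_cases hj' : j < lo
        · exact hlt j hj'
        · have : j ≤ (lo + hi) / 2 := by omega
          have hjlen : j < xs.length := by omega
          exact lt_of_le_of_lt (getD_mono_of_pairwise xs hs this hmidlen) hc
      · simp only [hc, if_false]
        refine ih lo ((lo + hi) / 2) (by omega) (by omega) (by omega) hlt ?_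
        intro j hj hjlen
        exact le_trans (not_lt.mp hc) (getD_mono_of_pairwise xs hs hj hjlen)
    · simp only [h, dite_false]
      have : lo = hi := by omega
      subst this
      exact ⟨hhi, hlt, hge⟩

-- PySem.List.insert at an in-range nonnegative index splits the list at that index
theorem pysem_insert_eq (xs : List Int) (p : Nat) (v : Int) (hp : p ≤ xs.length) :
    PySem.List.insert xs (p : Int) v = List.take p xs ++ v :: List.drop p xs := by
  have h1 : (PySem.List.sliceIndices xs.length (some (p : Int)) none 1).1.toNat = p := by
    simp [PySem.List.sliceIndices]
    omega
  simp [PySem.List.insert, h1]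

-- inserting v at index p is, up to permutation, just a cons
theorem insert_mid_perm_cons (xs : List Int) (v : Int) (p : Nat) :
    (List.take p xs ++ v :: List.drop p xs).Perm (v :: xs) := by
  refine List.perm_middle.trans ?_
  rw [List.take_append_drop]

-- inserting v at its leftmost insertion point keeps the list sorted
theorem insert_mid_pairwise (xs : List Int) (hs : xs.Pairwise (· ≤ ·)) (v : Int) (p : Nat)
    (hp : p ≤ xs.length)
    (hlt : ∀ j, j < p → xs.getD j 0 < v)
    (hge : ∀ j, p ≤ j → j < xs.length → v ≤ xs.getD j 0) :
    (List.take p xs ++ v :: List.drop p xs).Pairwise (· ≤ ·) := by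
  have htake := hs.sublist (List.take_sublist p xs)
  have hdrop := hs.sublist (List.drop_sublist p xs)
  have hgetD : ∀ (k : Nat) (hk : k < xs.length), xs.getD k 0 = xs[k] := by
    intro k hk
    simp [List.getD_eq_getElem?_getD, hk]
  have hvle : ∀ y ∈ List.drop p xs, v ≤ y := by
    intro y hy
    rcases List.getElem_of_mem hy with ⟨j, hj, rfl⟩
    rw [List.getElem_drop]
    have hlen : p + j < xs.length := by
      have := List.length_drop (l := xs) (i := p); omega
    have := hge (p + j) (by omega) hlen
    rwa [hgetD _ hlen] at this
  have htlt : ∀ a ∈ List.take p xs, a ≤ v := by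
    intro a ha
    rcases List.getElem_of_mem ha with ⟨i, hi, rfl⟩
    have hip : i < p := by
      have := List.length_take (i := p) (l := xs); omega
    have hilen : i < xs.length := by
      have := List.length_take (i := p) (l := xs); omega
    rw [List.getElem_take]
    have := le_of_lt (hlt i hip)
    rwa [hgetD _ hilen] at this
  refine List.pairwise_append.mpr ⟨htake, List.pairwise_cons.mpr ⟨hvle, hdrop⟩, ?_⟩
  intro a ha b hb
  rcases List.mem_cons.mp hb with rfl | hb'
  · exact htlt a ha
  · exact le_trans (htlt a ha) (hvle b hb')

-- setting position pre.length of pre ++ m :: suf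
theorem set_append_mid (pre suf : List Int) (m v : Int) :
    (pre ++ m :: suf).set pre.length v = pre ++ v :: suf := by
  induction pre with
  | nil => rfl
  | cons a t ih => simp [ih]

theorem loop_eq (fuel : Nat) : ∀ (xs ys : List Int) (res : Int),
    xs.Perm ys → ys.Pairwise (· ≤ ·) → solveLoopA fuel xs res = solveLoopB fuel ys res := by
  induction fuel with
  | zero => intro xs ys res _ _; rfl
  | succ f ih =>
    intro xs ys res hperm hsort
    rcases List.eq_nil_or_concat ys with hysnil | ⟨t, top, hdrop⟩
    · -- ys empty, hence xs empty: both loops stop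
      subst hysnil
      have hxsnil : xs = [] := List.Perm.eq_nil hperm
      subst hxsnil
      simp [solveLoopA, solveLoopB, PySem.List.max?, PySem.List.pop?]
    · -- ys = t ++ [top]; top is the maximum
      rw [List.concat_eq_append] at hdrop
      subst hdrop
      have hsort' : t.Pairwise (· ≤ ·) := hsort.sublist (by simp)
      have htopmem : top ∈ t ++ [top] := by simp
      have htopmax : ∀ y ∈ t ++ [top], y ≤ top := by
        intro y hy
        rcases List.mem_append.mp hy with h' | h'
        · exact (List.pairwise_append.mp hsort).2.2 y h' top (by simp)
        · simp at h'; exact h'.le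
      have hxsne : xs ≠ [] := by
        intro h; subst h
        have := List.Perm.eq_nil hperm.symm; simp at this
      -- A's max
      rcases hmax : PySem.List.max? xs (fun y => y) with _ | ⟨m⟩
      · exact absurd ((PySem.List.max?_eq_none_iff xs _).mp hmax) hxsne
      have hmmem : m ∈ xs := PySem.List.max?_mem hmax
      have hmmax : ∀ y ∈ xs, y ≤ m := PySem.List.max?_isMax hmax
      have hmtop : m = top :=
        le_antisymm (htopmax m (hperm.mem_iff.mp hmmem)) (hmmax top (hperm.mem_iff.mpr htopmem))
      subst hmtop
      -- A's index
      rcases hidx : PySem.List.index? xs m with _ | ⟨i⟩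
      · have := (PySem.List.index?_isSome_iff xs m).mpr hmmem
        rw [hidx] at this; simp at this
      rcases (PySem.List.index?_eq_some_iff xs m i).mp hidx with ⟨pre, suf, hxs, hlen, _⟩
      -- A's updated list
      have hget : PySem.List.pyGetD xs (i : Int) 0 = m := by
        rw [PySem.List.pyGetD_natCast, hxs, ← hlen]
        simp
      have hset : PySem.List.pySetD xs (i : Int) (PySem.List.pyGetD xs (i : Int) 0 - 1)
          = pre ++ (m - 1) :: suf := by
        rw [hget, PySem.List.pySetD_natCast, hxs, ← hlen, set_append_mid]
      -- B's step: pop the last element, insert m-1 at the binary-searched position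
      have hpop : PySem.List.pop? (t ++ [m]) = some (m, t) := PySem.List.pop?_last t m
      have hbs := bsearch_spec t hsort' (m - 1) t.length 0 t.length (by omega) (by omega)
        (le_refl _) (by omega) (by intro j hj hjl; omega)
      obtain ⟨hble, hblt, hbge⟩ := hbs
      have hinsert : PySem.List.insert t ((bsearch t (m - 1) 0 t.length : Nat) : Int) (m - 1)
          = List.take (bsearch t (m - 1) 0 t.length) t ++ (m - 1) :: List.drop (bsearch t (m - 1) 0 t.length) t :=
        pysem_insert_eq t _ _ hble
      -- the two updated lists are permutations of each other
      have hpermMid : (pre ++ suf).Perm t := by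
        have e1 : (m :: (pre ++ suf)).Perm xs := by
          rw [hxs]; exact List.perm_middle.symm
        have e2 : (t ++ [m]).Perm (m :: t) := List.perm_append_comm
        exact (List.perm_cons m).mp ((e1.trans hperm).trans e2)
      have hperm' : (pre ++ (m - 1) :: suf).Perm
          (List.take (bsearch t (m - 1) 0 t.length) t ++ (m - 1) :: List.drop (bsearch t (m - 1) 0 t.length) t) := by
        have e3 : (pre ++ (m - 1) :: suf).Perm ((m - 1) :: t) :=
          List.perm_middle.trans (hpermMid.cons _)
        exact e3.trans (insert_mid_perm_cons t (m - 1) _).symm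
      have hsort'' : (List.take (bsearch t (m - 1) 0 t.length) t ++ (m - 1) :: List.drop (bsearch t (m - 1) 0 t.length) t).Pairwise (· ≤ ·) :=
        insert_mid_pairwise t hsort' (m - 1) _ hble hblt hbge
      simp only [solveLoopA, solveLoopB, hmax, hidx, hpop, hset, hinsert]
      exact ih _ _ _ hperm' hsort''

-- ===== VERDICT (by name: the statement is the Claim_ definition above) =====
theorem solve_spec : Claim_equal_solve := by
  intro A B _ _
  unfold Spec_solve solve solve_alt
  refine loop_eq B.toNat A _ 0 ?_ ?_
  · exact (PySem.List.sorted_perm A (fun x => x) false).symm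
  · simpa using PySem.List.sorted_pairwise A (fun x => x)
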